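-- pv_equiv track=rewrite | github.com/SauravKg1/COMP580-ProbabilisticAlgorithmsAndDataStructures | project/cms_burst_sketch/burst_sketch.py | true_count_in_bucket_range
-- ===== SOURCE A (Python) =====
-- from typing import Dict, List, Optional, Tuple
--
-- def true_count_in_bucket_range(
--     true_buckets: Dict[int, Dict[str, int]],
--     ngram: str,
--     start_bucket: int,
--     end_bucket: int,
-- ) -> int:
--     if start_bucket > end_bucket:
--         return 0
--     total = 0
--     for b in range(start_bucket, end_bucket + 1):
--         if b < 0:
--             continue
--         bucket_dict = true_buckets.get(b)
--         if bucket_dict: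
--             total += bucket_dict.get(ngram, 0)
--     return total
-- ===== SOURCE B (Python) =====
-- def true_count_in_bucket_range(true_buckets, ngram, start_bucket, end_bucket):
--     total = 0
--     for k, bucket_dict in true_buckets.items():
--         if k >= 0 and start_bucket <= k <= end_bucket:
--             total += bucket_dict.get(ngram, 0)
--     return total
-- ===== Notes on version B (the rewrite author's own statement) =====
-- stated objective: alternative
-- what changed: B iterates over the dict's stored entries with a key-range filter instead of probing every integer in range(start_bucket, end_bucket+1), so cost depends on the number of stored buckets rather than the width of the index range; Pre_ only rules out duplicate outer keys in the Lean association-list encoding, which no Python dict can exhibit.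
import Mathlib
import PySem

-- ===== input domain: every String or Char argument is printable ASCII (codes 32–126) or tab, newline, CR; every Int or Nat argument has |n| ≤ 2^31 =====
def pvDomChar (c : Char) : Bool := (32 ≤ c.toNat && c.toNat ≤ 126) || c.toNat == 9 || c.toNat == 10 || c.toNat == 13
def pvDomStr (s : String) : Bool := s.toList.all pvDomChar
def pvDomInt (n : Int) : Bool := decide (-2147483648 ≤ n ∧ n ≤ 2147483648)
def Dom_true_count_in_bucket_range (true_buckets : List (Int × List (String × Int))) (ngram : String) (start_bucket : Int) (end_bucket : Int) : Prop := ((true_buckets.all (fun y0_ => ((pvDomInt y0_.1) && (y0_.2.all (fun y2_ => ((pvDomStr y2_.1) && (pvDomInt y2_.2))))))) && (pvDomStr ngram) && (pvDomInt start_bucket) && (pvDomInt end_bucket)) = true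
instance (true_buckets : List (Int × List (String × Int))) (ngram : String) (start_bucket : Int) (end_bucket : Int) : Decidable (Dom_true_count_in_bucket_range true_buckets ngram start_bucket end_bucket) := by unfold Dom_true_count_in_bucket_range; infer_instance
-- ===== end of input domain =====

-- B iterates over the stored (bucket, dict) entries with a key-range filter instead of probing
-- every integer index in range(start_bucket, end_bucket+1); return values only, no side effects.

-- ===== PORT A =====
def true_count_in_bucket_range (true_buckets : List (Int × List (String × Int))) (ngram : String) (start_bucket : Int) (end_bucket : Int) : Int :=
  if start_bucket > end_bucket then 0
  else
    (PySem.List.pyRange start_bucket (end_bucket + 1) 1).foldl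
      (fun total b =>
        if b < 0 then total
        else
          match (PySem.Dict.mk true_buckets).get? b with
          | none => total
          | some bucket_dict =>
              if bucket_dict ≠ [] then total + (PySem.Dict.mk bucket_dict).getD ngram 0
              else total)
      0

-- ===== PORT B =====
def true_count_in_bucket_range_alt (true_buckets : List (Int × List (String × Int))) (ngram : String) (start_bucket : Int) (end_bucket : Int) : Int :=
  true_buckets.foldl
    (fun total kv =>
      if 0 ≤ kv.1 ∧ start_bucket ≤ kv.1 ∧ kv.1 ≤ end_bucket then
        total + (PySem.Dict.mk kv.2).getD ngram 0
      else total)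
    0

-- ===== PRECONDITION & SPEC =====
-- Pre_ excludes association lists whose outer bucket keys repeat: such lists do not represent a
-- Python dict (A's lookup reads the first matching entry while B walks every entry), so the
-- duplicate-key corner is an artefact of the Lean encoding, not of either Python program.
def Pre_true_count_in_bucket_range (true_buckets : List (Int × List (String × Int))) (ngram : String) (start_bucket : Int) (end_bucket : Int) : Prop :=
  (true_buckets.map Prod.fst).Nodup
instance (true_buckets : List (Int × List (String × Int))) (ngram : String) (start_bucket : Int) (end_bucket : Int) : Decidable (Pre_true_count_in_bucket_range true_buckets ngram start_bucket end_bucket) := by unfold Pre_true_count_in_bucket_range; infer_instance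

def pvWitness_true_count_in_bucket_range : (List (Int × List (String × Int))) × String × Int × Int :=
  ([(0, [("a", 1)]), (2, [("a", 3), ("b", 4)])], "a", 0, 2)

def Spec_true_count_in_bucket_range (true_buckets : List (Int × List (String × Int))) (ngram : String) (start_bucket : Int) (end_bucket : Int) (out : Int) : Prop := out = true_count_in_bucket_range_alt true_buckets ngram start_bucket end_bucket
instance (true_buckets : List (Int × List (String × Int))) (ngram : String) (start_bucket : Int) (end_bucket : Int) (out : Int) : Decidable (Spec_true_count_in_bucket_range true_buckets ngram start_bucket end_bucket out) := by unfold Spec_true_count_in_bucket_range; infer_instance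

-- ===== CLAIM (what is proved, stated in full; the proofs are below) =====
def Claim_equal_true_count_in_bucket_range : Prop := ∀ (true_buckets : List (Int × List (String × Int))) (ngram : String) (start_bucket : Int) (end_bucket : Int), Dom_true_count_in_bucket_range true_buckets ngram start_bucket end_bucket → Pre_true_count_in_bucket_range true_buckets ngram start_bucket end_bucket → Spec_true_count_in_bucket_range true_buckets ngram start_bucket end_bucket (true_count_in_bucket_range true_buckets ngram start_bucket end_bucket)

-- ===== LEMMAS AND PROOFS =====

-- A's per-index contribution: what iteration b of A's range loop adds to total.
def pvGA (tb : List (Int × List (String × Int))) (ngram : String) (b : Int) : Int :=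
  if b < 0 then 0
  else
    match (PySem.Dict.mk tb).get? b with
    | none => 0
    | some bd => if bd ≠ [] then (PySem.Dict.mk bd).getD ngram 0 else 0

-- B's per-entry contribution.
def pvGB (ngram : String) (s e : Int) (kv : Int × List (String × Int)) : Int :=
  if 0 ≤ kv.1 ∧ s ≤ kv.1 ∧ kv.1 ≤ e then (PySem.Dict.mk kv.2).getD ngram 0 else 0

lemma pvA_as_sum (tb : List (Int × List (String × Int))) (ngram : String) (s e : Int) :
    (PySem.List.pyRange s (e + 1) 1).foldl
      (fun total b =>
        if b < 0 then total
        else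
          match (PySem.Dict.mk tb).get? b with
          | none => total
          | some bucket_dict =>
              if bucket_dict ≠ [] then total + (PySem.Dict.mk bucket_dict).getD ngram 0
              else total)
      0 = ((PySem.List.pyRange s (e + 1) 1).map (pvGA tb ngram)).sum := by
  rw [PySem.List.foldl_congr_mem (g := fun total b => total + pvGA tb ngram b)]
  · rw [PySem.List.foldl_add]; ring
  · intro acc x _
    simp only [pvGA]
    split_ifs with h
    · ring
    · cases (PySem.Dict.mk tb).get? x with
      | none => ring
      | some bd =>
          dsimp only
          split_ifs <;> ring

lemma pvB_as_sum (tb : List (Int × List (String × Int))) (ngram : String) (s e : Int) :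
    tb.foldl
      (fun total kv =>
        if 0 ≤ kv.1 ∧ s ≤ kv.1 ∧ kv.1 ≤ e then
          total + (PySem.Dict.mk kv.2).getD ngram 0
        else total)
      0 = (tb.map (pvGB ngram s e)).sum := by
  rw [PySem.List.foldl_congr_mem (g := fun total kv => total + pvGB ngram s e kv)]
  · rw [PySem.List.foldl_add]; ring
  · intro acc x _
    simp only [pvGB]
    split_ifs <;> ring

-- generic: replacing h at one key, when the list is nodup and h k = 0
lemma pvSum_replace {l : List Int} (hnd : l.Nodup) (k : Int) (c : Int) (h : Int → Int)
    (hk : h k = 0) :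
    (l.map (fun b => if b = k then c else h b)).sum
      = (if k ∈ l then c else 0) + (l.map h).sum := by
  induction l with
  | nil => simp
  | cons a l ih =>
      simp only [List.nodup_cons] at hnd
      simp only [List.map_cons, List.sum_cons, List.mem_cons]
      by_cases hak : a = k
      · subst hak
        have : ∀ b ∈ l, (if b = a then c else h b) = h b := by
          intro b hb
          have : b ≠ a := fun hba => hnd.1 (hba ▸ hb)
          simp [this]
        rw [List.map_congr_left this]
        simp [hk]
      · rw [ih hnd.2]
        by_cases hkl : k ∈ l <;> simp [hak, Ne.symm hak, hkl] <;> ring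

lemma pvGA_rest_zero (k : Int) (bd : List (String × Int))
    (rest : List (Int × List (String × Int))) (ngram : String)
    (hk : k ∉ rest.map Prod.fst) : pvGA rest ngram k = 0 := by
  unfold pvGA
  split_ifs with h
  · rfl
  · have : (PySem.Dict.mk rest).get? k = none := by
      rw [PySem.Dict.get?_eq_none_iff_not_mem_keys]
      simpa [PySem.Dict.keys_mk] using hk
    rw [this]

lemma pvSum_eq (tb : List (Int × List (String × Int))) (ngram : String) (s e : Int)
    (hnd : (tb.map Prod.fst).Nodup) :
    ((PySem.List.pyRange s (e + 1) 1).map (pvGA tb ngram)).sum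
      = (tb.map (pvGB ngram s e)).sum := by
  induction tb with
  | nil =>
      have h0 : ∀ b ∈ PySem.List.pyRange s (e + 1) 1, pvGA ([] : List (Int × List (String × Int))) ngram b = 0 := by
        intro b _
        unfold pvGA
        split_ifs <;> rfl
      rw [List.map_congr_left h0]
      simp
  | cons kvh rest ih =>
      obtain ⟨k, bd⟩ := kvh
      simp only [List.map_cons, List.nodup_cons] at hnd
      have hpt : ∀ b, pvGA ((k, bd) :: rest) ngram b
          = (fun b => if b = k then (if 0 ≤ k then
              (if bd ≠ [] then (PySem.Dict.mk bd).getD ngram 0 else 0) else 0)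
              else pvGA rest ngram b) b := by
        intro b
        simp only [pvGA, PySem.Dict.get?_mk_cons, beq_iff_eq]
        by_cases hbk : b = k
        · subst hbk
          by_cases hb : b < 0 <;> simp [hb] <;> omega
        · have : ¬ k = b := fun h => hbk h.symm
          simp [hbk, this]
      rw [List.map_congr_left (fun b _ => hpt b),
          pvSum_replace (PySem.List.nodup_pyRange_one s (e + 1)) k _ _
            (pvGA_rest_zero k bd rest ngram hnd.1),
          ih hnd.2]
      simp only [List.map_cons, List.sum_cons, pvGB, PySem.List.mem_pyRange_one]
      have hempty : (if (bd : List (String × Int)) ≠ [] then (PySem.Dict.mk bd).getD ngram 0 else 0)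
          = (PySem.Dict.mk bd).getD ngram 0 := by
        split_ifs with h
        · rfl
        · simp at h; subst h
          rfl
      rw [hempty]
      split_ifs <;> omega

-- ===== VERDICT (by name: the statement is the Claim_ definition above) =====
theorem true_count_in_bucket_range_spec : Claim_equal_true_count_in_bucket_range := by
  intro tb ngram s e _ hpre
  unfold Spec_true_count_in_bucket_range true_count_in_bucket_range true_count_in_bucket_range_alt
  rw [pvA_as_sum, pvB_as_sum, pvSum_eq tb ngram s e hpre]
  split_ifs with h
  · symm
    have : ∀ kv ∈ tb, pvGB ngram s e kv = 0 := by
      intro kv _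
      unfold pvGB
      split_ifs with hc
      · omega
      · rfl
    rw [List.map_congr_left this]
    simp
  · rfl
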